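-- pv_equiv track=rewrite | github.com/Terence-wilson/Random_projects | funkle.py | tally_onesNfives
-- ===== SOURCE A (Python) =====
-- def tally_onesNfives(bois):
--     points = 0
--     numbers = bois.keys()
--     count = 0
--     for num in numbers:
--         if num == 1 and bois[num] != 4:
--             count += 1 * bois[num]
--             points += 100 * bois[num]
--         elif num == 5 and bois[num] < 3:
--             count += 1 * bois[num]
--             points += 50 * bois[num]
--     return points, count
-- ===== SOURCE B (Python) =====
-- def tally_onesNfives(bois):
--     points = 0
--     count = 0
--     ones = bois.get(1, 0)
--     fives = bois.get(5, 0)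
--     if ones != 4:
--         points += 100 * ones
--         count += ones
--     if fives < 3:
--         points += 50 * fives
--         count += fives
--     return points, count
-- ===== Notes on version B (the rewrite author's own statement) =====
-- stated objective: simpler
-- what changed: Replaces the loop over all dict keys (with a lookup per key) by two direct .get lookups for keys 1 and 5 and straight-line guards; absent keys contribute 0 either way.
import Mathlib
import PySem

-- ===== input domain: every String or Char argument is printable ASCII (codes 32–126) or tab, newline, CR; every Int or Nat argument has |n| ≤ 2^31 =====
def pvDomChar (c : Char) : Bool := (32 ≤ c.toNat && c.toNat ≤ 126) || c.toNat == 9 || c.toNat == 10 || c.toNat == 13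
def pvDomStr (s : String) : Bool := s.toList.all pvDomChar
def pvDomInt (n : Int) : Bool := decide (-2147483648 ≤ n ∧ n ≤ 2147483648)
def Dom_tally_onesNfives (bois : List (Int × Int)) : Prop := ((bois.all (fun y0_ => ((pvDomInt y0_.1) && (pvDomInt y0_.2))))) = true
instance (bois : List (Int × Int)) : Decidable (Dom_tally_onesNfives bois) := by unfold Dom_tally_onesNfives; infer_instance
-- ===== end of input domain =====

-- B replaces A's scan over every dict key by two direct lookups for keys 1 and 5 (objective: simpler).

-- ===== PORT A =====
-- one loop iteration: num == 1 / num == 5 branches, lookups bois[num] into the dict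
def tallyStepA (bois : List (Int × Int)) (s : Int × Int) (num : Int) : Int × Int :=
  let v := (PySem.Dict.mk bois).getD num 0   -- bois[num]; exact: num is drawn from the dict's keys
  if num = 1 ∧ v ≠ 4 then (s.1 + 100 * v, s.2 + 1 * v)
  else if num = 5 ∧ v < 3 then (s.1 + 50 * v, s.2 + 1 * v)
  else s

def tally_onesNfives (bois : List (Int × Int)) : Int × Int :=
  let numbers := (PySem.Dict.mk bois).keys
  -- points/count accumulated through the loop, returned as (points, count)
  numbers.foldl (tallyStepA bois) (0, 0)

-- ===== PORT B =====
def tally_onesNfives_alt (bois : List (Int × Int)) : Int × Int :=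
  let ones := (PySem.Dict.mk bois).getD 1 0
  let fives := (PySem.Dict.mk bois).getD 5 0
  let points := (if ones ≠ 4 then 100 * ones else 0) + (if fives < 3 then 50 * fives else 0)
  let count := (if ones ≠ 4 then ones else 0) + (if fives < 3 then fives else 0)
  (points, count)

-- ===== PRECONDITION & SPEC =====
-- Pre_ excludes association lists with duplicate keys, which cannot arise from the Python dict A receives.
def Pre_tally_onesNfives (bois : List (Int × Int)) : Prop := (bois.map Prod.fst).Nodup
instance (bois : List (Int × Int)) : Decidable (Pre_tally_onesNfives bois) := by unfold Pre_tally_onesNfives; infer_instance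
def pvWitness_tally_onesNfives : (List (Int × Int)) := [(1, 2), (5, 1), (3, 6)]

def Spec_tally_onesNfives (bois : List (Int × Int)) (out : Int × Int) : Prop := out = tally_onesNfives_alt bois
instance (bois : List (Int × Int)) (out : Int × Int) : Decidable (Spec_tally_onesNfives bois out) := by unfold Spec_tally_onesNfives; infer_instance

-- ===== CLAIM (what is proved, stated in full; the proofs are below) =====
def Claim_equal_tally_onesNfives : Prop := ∀ (bois : List (Int × Int)), Dom_tally_onesNfives bois → Pre_tally_onesNfives bois → Spec_tally_onesNfives bois (tally_onesNfives bois)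

-- ===== LEMMAS AND PROOFS =====

-- characterisation of A's fold over any duplicate-free key list
theorem foldA_char (bois : List (Int × Int)) (l : List Int) (s : Int × Int) (h : l.Nodup) :
    l.foldl (tallyStepA bois) s =
      let ones := (PySem.Dict.mk bois).getD 1 0
      let fives := (PySem.Dict.mk bois).getD 5 0
      (s.1 + (if 1 ∈ l ∧ ones ≠ 4 then 100 * ones else 0) + (if 5 ∈ l ∧ fives < 3 then 50 * fives else 0),
       s.2 + (if 1 ∈ l ∧ ones ≠ 4 then ones else 0) + (if 5 ∈ l ∧ fives < 3 then fives else 0)) := by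
  induction l generalizing s with
  | nil => simp
  | cons num t ih =>
    rcases List.nodup_cons.mp h with ⟨hmem, hnd⟩
    rw [List.foldl_cons, ih _ hnd]
    simp only [tallyStepA, List.mem_cons]
    by_cases h1 : num = 1
    · subst h1
      have h1t : (1 : Int) ∉ t := hmem
      simp only [h1t, Prod.ext_iff]
      split_ifs <;> simp_all
    · by_cases h5 : num = 5
      · subst h5
        have h5t : (5 : Int) ∉ t := hmem
        simp only [h5t, Prod.ext_iff]
        split_ifs <;> simp_all <;> omega
      · have e1 : ¬((1 : Int) = num) := fun e => h1 e.symm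
        have e5 : ¬((5 : Int) = num) := fun e => h5 e.symm
        simp [h1, h5, e1, e5]

theorem getD_not_mem_keys (bois : List (Int × Int)) (k : Int)
    (h : k ∉ bois.map Prod.fst) : (PySem.Dict.mk bois).getD k 0 = 0 := by
  apply PySem.Dict.getD_of_not_contains
  rw [PySem.Dict.contains_eq_decide_mem_keys]
  simpa [PySem.Dict.keys_mk] using h

-- ===== VERDICT (by name: the statement is the Claim_ definition above) =====
theorem tally_onesNfives_spec : Claim_equal_tally_onesNfives := by
  intro bois _ hpre
  unfold Spec_tally_onesNfives tally_onesNfives tally_onesNfives_alt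
  have hnd : ((PySem.Dict.mk bois).keys).Nodup := by simpa [PySem.Dict.keys_mk] using hpre
  rw [foldA_char bois _ _ hnd]
  simp only [PySem.Dict.keys_mk]
  set ones := (PySem.Dict.mk bois).getD 1 0 with hone
  set fives := (PySem.Dict.mk bois).getD 5 0 with hfive
  by_cases h1 : (1 : Int) ∈ bois.map Prod.fst <;>
    by_cases h5 : (5 : Int) ∈ bois.map Prod.fst
  · simp [h1, h5, ite_not]
  · have hf : fives = 0 := by rw [hfive]; exact getD_not_mem_keys bois 5 h5
    simp [h1, h5, hf, ite_not]
  · have ho : ones = 0 := by rw [hone]; exact getD_not_mem_keys bois 1 h1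
    simp [h1, h5, ho, ite_not]
  · have ho : ones = 0 := by rw [hone]; exact getD_not_mem_keys bois 1 h1
    have hf : fives = 0 := by rw [hfive]; exact getD_not_mem_keys bois 5 h5
    simp [h1, h5, ho, hf, ite_not]
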